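-- pv_equiv track=rewrite | github.com/hughrscott/map_pr_analyzer | src/git_tools.py | _truncate_diff
-- ===== SOURCE A (Python) =====
-- def _truncate_diff(diff: str, max_chars: int) -> str:
--     """Truncate diff to fit within token limits while preserving structure."""
--     if len(diff) <= max_chars:
--         return diff
--
--     # Try to truncate at file boundaries
--     lines = diff.split('\n')
--     truncated_lines = []
--     current_size = 0
--
--     for line in lines:
--         line_size = len(line) + 1  # +1 for newline
--         if current_size + line_size > max_chars:
--             truncated_lines.append(f"\n... [DIFF TRUNCATED - {len(lines) - len(truncated_lines)} more lines] ...")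
--             break
--         truncated_lines.append(line)
--         current_size += line_size
--
--     return '\n'.join(truncated_lines)
-- ===== SOURCE B (Python) =====
-- def _truncate_diff(diff: str, max_chars: int) -> str:
--     """Truncate diff to fit within token limits while preserving structure."""
--     if len(diff) <= max_chars:
--         return diff
--
--     # Table-plus-search decomposition: build the prefix-sum table of line
--     # sizes once, then binary-search it for the cutoff index.
--     lines = diff.split('\n')
--     cum = []
--     total = 0
--     for line in lines:
--         total += len(line) + 1
--         cum.append(total)
--
--     # rightmost k with cum[k-1] <= max_chars (bisect_right by hand)
--     lo, hi = 0, len(cum)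
--     while lo < hi:
--         mid = (lo + hi) // 2
--         if cum[mid] <= max_chars:
--             lo = mid + 1
--         else:
--             hi = mid
--
--     marker = f"\n... [DIFF TRUNCATED - {len(lines) - lo} more lines] ..."
--     return '\n'.join(lines[:lo] + [marker])
-- ===== Notes on version B (the rewrite author's own statement) =====
-- stated objective: alternative
-- what changed: Replaces the incremental accumulate-and-break scan with a prefix-sum table built once plus a binary search (bisect_right by hand) for the cutoff line index, then a slice-and-join.
import Mathlib
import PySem

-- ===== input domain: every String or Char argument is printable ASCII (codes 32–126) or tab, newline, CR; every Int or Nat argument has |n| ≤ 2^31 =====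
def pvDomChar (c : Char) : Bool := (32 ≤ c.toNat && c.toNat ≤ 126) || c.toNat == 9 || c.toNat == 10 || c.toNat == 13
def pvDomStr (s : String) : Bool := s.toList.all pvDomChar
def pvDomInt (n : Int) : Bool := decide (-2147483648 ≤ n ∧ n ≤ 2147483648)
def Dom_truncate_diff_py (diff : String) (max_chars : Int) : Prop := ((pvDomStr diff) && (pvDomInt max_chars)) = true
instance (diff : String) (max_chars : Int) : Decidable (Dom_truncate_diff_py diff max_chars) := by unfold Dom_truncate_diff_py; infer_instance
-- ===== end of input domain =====

-- B replaces A's accumulate-and-break scan by a prefix-sum table plus a binary search for the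
-- cutoff index (alternative decomposition, same asymptotic cost).

-- ===== PORT A =====
-- A's f"\n... [DIFF TRUNCATED - {n} more lines] ..." marker
def pvMarkerA (n : Int) : List Char :=
  "\n... [DIFF TRUNCATED - ".toList ++ PySem.Int.toChars n ++ " more lines] ...".toList

-- A's for-loop with break: acc = truncated_lines, cur = current_size
def pvTruncLoopA (m total : Int) : List (List Char) → List (List Char) → Int → List (List Char)
  | [], acc, _ => acc
  | line :: rest, acc, cur =>
    if cur + (PySem.Chars.len line + 1) > m then
      acc ++ [pvMarkerA (total - (acc.length : Int))]
    else
      pvTruncLoopA m total rest (acc ++ [line]) (cur + (PySem.Chars.len line + 1))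

def truncate_diff_py (diff : String) (max_chars : Int) : String :=
  if PySem.Str.len diff ≤ max_chars then diff
  else
    let lines := PySem.Chars.splitOn diff.toList ['\n']
    String.ofList (PySem.Chars.join ['\n'] (pvTruncLoopA max_chars ((lines.length : Int)) lines [] 0))

-- ===== PORT B =====
def pvMarkerB (n : Int) : List Char :=
  "\n... [DIFF TRUNCATED - ".toList ++ PySem.Int.toChars n ++ " more lines] ...".toList

-- Source B's prefix-sum table: total += len(line) + 1; cum.append(total)
def pvCumB : List (List Char) → Int → List Int
  | [], _ => []
  | line :: rest, total =>
    (total + (PySem.Chars.len line + 1)) :: pvCumB rest (total + (PySem.Chars.len line + 1))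

-- Source B's hand-written bisect_right loop; cum[mid] is always in range (0 ≤ lo ≤ mid < hi ≤ len cum),
-- so pyGetD's default is never used
def pvBisectB (cum : List Int) (m : Int) (lo hi : Int) : Int :=
  if h : lo < hi then
    if PySem.List.pyGetD cum (PySem.Int.floordiv (lo + hi) 2) 0 ≤ m then
      pvBisectB cum m (PySem.Int.floordiv (lo + hi) 2 + 1) hi
    else
      pvBisectB cum m lo (PySem.Int.floordiv (lo + hi) 2)
  else lo
termination_by (hi - lo).toNat
decreasing_by
  all_goals simp only [PySem.Int.floordiv] at *
  all_goals rw [Int.fdiv_eq_ediv]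
  all_goals omega

def truncate_diff_py_alt (diff : String) (max_chars : Int) : String :=
  if PySem.Str.len diff ≤ max_chars then diff
  else
    let lines := PySem.Chars.splitOn diff.toList ['\n']
    let cum := pvCumB lines 0
    let k := pvBisectB cum max_chars 0 ((cum.length : Int))
    String.ofList (PySem.Chars.join ['\n']
      (PySem.List.slice lines none (some k) ++ [pvMarkerB ((lines.length : Int) - k)]))

-- ===== PRECONDITION & SPEC =====
def Spec_truncate_diff_py (diff : String) (max_chars : Int) (out : String) : Prop := out = truncate_diff_py_alt diff max_chars
instance (diff : String) (max_chars : Int) (out : String) : Decidable (Spec_truncate_diff_py diff max_chars out) := by unfold Spec_truncate_diff_py; infer_instance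

-- ===== CLAIM (what is proved, stated in full; the proofs are below) =====
def Claim_equal_truncate_diff_py : Prop := ∀ (diff : String) (max_chars : Int), Dom_truncate_diff_py diff max_chars → Spec_truncate_diff_py diff max_chars (truncate_diff_py diff max_chars)

-- ===== LEMMAS AND PROOFS =====

-- a direct (fuel-free) model of diff.split('\n')
def pvSplitList : List Char → List Char → List (List Char)
  | cur, [] => [cur]
  | cur, c :: rest => if c = '\n' then cur :: pvSplitList [] rest else pvSplitList (cur ++ [c]) rest

theorem pvGo_eq (fuel : Nat) : ∀ (l cur : List Char) (acc : List (List Char)), l.length < fuel →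
    PySem.Chars.splitOn.go ['\n'] fuel l cur acc = acc.reverse ++ pvSplitList cur.reverse l := by
  induction fuel with
  | zero => intro l cur acc h; omega
  | succ n ih =>
    intro l cur acc h
    cases l with
    | nil => simp [PySem.Chars.splitOn.go, pvSplitList]
    | cons c rest =>
      by_cases hc : c = '\n'
      · subst hc
        have hrec := ih rest [] (cur.reverse :: acc) (by simpa using h)
        simp [PySem.Chars.splitOn.go, pvSplitList, hrec]
      · have hc' : ¬ '\n' = c := fun hh => hc hh.symm
        have hrec := ih rest (c :: cur) acc (by simpa using h)
        simp [PySem.Chars.splitOn.go, pvSplitList, hc, hc', hrec]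

theorem pvSplitOn_nl (cs : List Char) :
    PySem.Chars.splitOn cs ['\n'] = pvSplitList [] cs := by
  unfold PySem.Chars.splitOn
  rw [pvGo_eq (cs.length + 1) cs [] [] (by omega)]
  simp

def pvSumSizes (ls : List (List Char)) : Int := (ls.map (fun l => PySem.Chars.len l + 1)).sum

theorem pvSumSizes_cons (l : List Char) (ls : List (List Char)) :
    pvSumSizes (l :: ls) = (PySem.Chars.len l + 1) + pvSumSizes ls := by
  simp [pvSumSizes]

theorem pvSum_splitList : ∀ (l cur : List Char),
    pvSumSizes (pvSplitList cur l) = (cur.length : Int) + l.length + 1 := by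
  intro l
  induction l with
  | nil => intro cur; simp [pvSplitList, pvSumSizes, PySem.Chars.len]
  | cons c rest ih =>
    intro cur
    by_cases hc : c = '\n'
    · simp only [pvSplitList, if_pos hc]
      rw [pvSumSizes_cons, ih []]
      simp [PySem.Chars.len]; omega
    · simp only [pvSplitList, if_neg hc]
      rw [ih (cur ++ [c])]
      simp; omega

theorem pvSplitList_ne_nil : ∀ (l cur : List Char), pvSplitList cur l ≠ [] := by
  intro l
  induction l with
  | nil => intro cur; simp [pvSplitList]
  | cons c rest ih =>
    intro cur
    by_cases hc : c = '\n'
    · simp [pvSplitList, hc]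
    · simp only [pvSplitList, if_neg hc]; exact ih _

-- the cutoff: number of lines whose cumulative size fits
def pvK (cum : List Int) (m : Int) : Nat := (cum.takeWhile (fun c => decide (c ≤ m))).length

theorem pvCumB_mem_gt : ∀ (ls : List (List Char)) (t x : Int), x ∈ pvCumB ls t → t < x := by
  intro ls
  induction ls with
  | nil => intro t x hx; simp [pvCumB] at hx
  | cons l rest ih =>
    intro t x hx
    simp only [pvCumB, List.mem_cons] at hx
    have hlen : (0 : Int) ≤ PySem.Chars.len l := by simp [PySem.Chars.len]
    rcases hx with h | h
    · omega
    · have := ih _ _ h; omega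

theorem pvK_iff (m : Int) : ∀ (ls : List (List Char)) (t : Int) (i : Nat)
    (h : i < (pvCumB ls t).length),
    ((pvCumB ls t)[i] ≤ m ↔ i < pvK (pvCumB ls t) m) := by
  intro ls
  induction ls with
  | nil => intro t i h; simp [pvCumB] at h
  | cons l rest ih =>
    intro t i h
    simp only [pvCumB, PySem.Chars.len] at h ⊢
    by_cases h0 : t + ((l.length : Int) + 1) ≤ m
    · have hKc : pvK ((t + ((l.length : Int) + 1)) :: pvCumB rest (t + ((l.length : Int) + 1))) m
          = pvK (pvCumB rest (t + ((l.length : Int) + 1))) m + 1 := by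
        simp [pvK, List.takeWhile_cons, h0]
      cases i with
      | zero =>
        rw [hKc]
        simp [h0]
      | succ j =>
        have h' : j < (pvCumB rest (t + ((l.length : Int) + 1))).length := by
          simpa using h
        have hih := ih (t + ((l.length : Int) + 1)) j h'
        rw [hKc]
        simp only [List.getElem_cons_succ]
        rw [hih]
        omega
    · have hKc : pvK ((t + ((l.length : Int) + 1)) :: pvCumB rest (t + ((l.length : Int) + 1))) m
          = 0 := by
        simp [pvK, List.takeWhile_cons, h0]
      cases i with
      | zero =>
        rw [hKc]
        simp [h0]
      | succ j =>
        have h' : j < (pvCumB rest (t + ((l.length : Int) + 1))).length := by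
          simpa using h
        have hmem : (pvCumB rest (t + ((l.length : Int) + 1)))[j] ∈
            pvCumB rest (t + ((l.length : Int) + 1)) := List.getElem_mem h'
        have hgt := pvCumB_mem_gt _ _ _ hmem
        rw [hKc]
        simp only [List.getElem_cons_succ]
        constructor
        · intro hle; omega
        · intro hlt; omega

theorem pvK_le_length (cum : List Int) (m : Int) : pvK cum m ≤ cum.length := by
  exact List.IsPrefix.length_le (List.takeWhile_prefix _)

theorem pvBisect_eq (cum : List Int) (m : Int) (K : Nat) (hK : K ≤ cum.length)
    (hP : ∀ i (h : i < cum.length), (cum[i] ≤ m ↔ i < K)) :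
    ∀ (lo hi : Int), 0 ≤ lo → lo ≤ (K : Int) → (K : Int) ≤ hi → hi ≤ (cum.length : Int) →
      pvBisectB cum m lo hi = (K : Int) := by
  intro lo hi
  fun_induction pvBisectB cum m lo hi with
  | case1 lo hi hlt hle ih =>
    intro h0 h1 h2 h3
    have hmid : lo ≤ PySem.Int.floordiv (lo + hi) 2 ∧ PySem.Int.floordiv (lo + hi) 2 < hi := by
      simp only [PySem.Int.floordiv]; rw [Int.fdiv_eq_ediv]; omega
    set mid := PySem.Int.floordiv (lo + hi) 2 with hmiddef
    have hrange : mid.toNat < cum.length := by omega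
    rw [PySem.List.pyGetD_eq_getElem cum 0 (by omega) (by omega)] at hle
    have := (hP mid.toNat hrange).mp hle
    exact ih (by omega) (by omega) h2 h3
  | case2 lo hi hlt hgt ih =>
    intro h0 h1 h2 h3
    have hmid : lo ≤ PySem.Int.floordiv (lo + hi) 2 ∧ PySem.Int.floordiv (lo + hi) 2 < hi := by
      simp only [PySem.Int.floordiv]; rw [Int.fdiv_eq_ediv]; omega
    set mid := PySem.Int.floordiv (lo + hi) 2 with hmiddef
    have hrange : mid.toNat < cum.length := by omega
    rw [PySem.List.pyGetD_eq_getElem cum 0 (by omega) (by omega)] at hgt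
    have : ¬ mid.toNat < K := fun h => hgt ((hP mid.toNat hrange).mpr h)
    exact ih h0 h1 (by omega) (by omega)
  | case3 lo hi hlt =>
    intro h0 h1 h2 h3
    omega

theorem pvLoopA_eq (m T : Int) : ∀ (rest acc : List (List Char)) (cur : Int),
    m < cur + pvSumSizes rest → (cur ≤ m ∨ rest ≠ []) →
    pvTruncLoopA m T rest acc cur =
      acc ++ rest.take (pvK (pvCumB rest cur) m)
          ++ [pvMarkerA (T - ((acc.length : Int) + (pvK (pvCumB rest cur) m : Int)))] := by
  intro rest
  induction rest with
  | nil =>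
    intro acc cur h1 h2
    simp [pvSumSizes] at h1
    rcases h2 with h2 | h2
    · omega
    · exact absurd rfl h2
  | cons l rest' ih =>
    intro acc cur h1 h2
    rw [pvSumSizes_cons] at h1
    simp only [PySem.Chars.len] at h1
    by_cases hb : m < cur + ((l.length : Int) + 1)
    · have hK0 : pvK (pvCumB (l :: rest') cur) m = 0 := by
        simp only [pvCumB, pvK, PySem.Chars.len, List.takeWhile_cons]
        simp [show ¬ (cur + ((l.length : Int) + 1) ≤ m) by omega]
      have hbranch : m < cur + (PySem.Chars.len l + 1) := by
        simp only [PySem.Chars.len]; omega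
      simp only [pvTruncLoopA, if_pos hbranch, hK0]
      simp
    · have hble : cur + ((l.length : Int) + 1) ≤ m := by omega
      have hK : pvK (pvCumB (l :: rest') cur) m
          = pvK (pvCumB rest' (cur + (PySem.Chars.len l + 1))) m + 1 := by
        simp only [pvCumB, pvK, PySem.Chars.len, List.takeWhile_cons]
        simp [hble]
      have hbranch : ¬ m < cur + (PySem.Chars.len l + 1) := by
        simp only [PySem.Chars.len]; omega
      simp only [pvTruncLoopA, if_neg hbranch]
      rw [ih (acc ++ [l]) (cur + (PySem.Chars.len l + 1))
          (by simp only [PySem.Chars.len]; omega)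
          (Or.inl (by simp only [PySem.Chars.len]; omega)), hK]
      simp only [List.take_succ_cons, List.append_assoc, List.cons_append, List.nil_append,
        List.length_append, List.length_cons, List.length_nil]
      congr 3
      simp only [PySem.Chars.len]
      push_cast
      congr 2
      omega

theorem truncate_diff_eq (diff : String) (max_chars : Int) :
    truncate_diff_py diff max_chars = truncate_diff_py_alt diff max_chars := by
  unfold truncate_diff_py truncate_diff_py_alt
  by_cases h : PySem.Str.len diff ≤ max_chars
  · have h2 : (diff.length : Int) ≤ max_chars := by simpa [PySem.Str.len] using h
    simp [h2]
  · simp only [if_neg h]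
    rw [pvSplitOn_nl]
    set lines := pvSplitList [] diff.toList with hl
    set K := pvK (pvCumB lines 0) max_chars with hKdef
    have hlen : ¬ ((diff.toList.length : Int) ≤ max_chars) := by
      simpa [PySem.Str.len] using h
    have hsum : pvSumSizes lines = (diff.toList.length : Int) + 1 := by
      simpa using pvSum_splitList diff.toList []
    have hA := pvLoopA_eq max_chars ((lines.length : Int)) lines [] 0
      (by omega) (Or.inr (pvSplitList_ne_nil _ _))
    have hKle : K ≤ (pvCumB lines 0).length := pvK_le_length _ _
    have hB := pvBisect_eq (pvCumB lines 0) max_chars K hKle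
      (fun i hi => pvK_iff max_chars lines 0 i hi) 0 ((pvCumB lines 0).length)
      (by omega) (by omega) (by omega) (by omega)
    rw [hA, hB, PySem.List.slice_to lines (by omega)]
    have hKN : ((K : Int)).toNat = K := Int.toNat_natCast K
    rw [hKN]
    simp only [pvMarkerA, pvMarkerB, ← hKdef, List.nil_append, List.length_nil,
      Nat.cast_zero, zero_add]

-- ===== VERDICT (by name: the statement is the Claim_ definition above) =====
theorem truncate_diff_py_spec : Claim_equal_truncate_diff_py := by
  intro diff max_chars _
  unfold Spec_truncate_diff_py
  exact truncate_diff_eq diff max_chars
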